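-- pv_equiv track=rewrite | github.com/PhilipDam/Python-Samples | Tokenizer/tokenizer.py | _advance_position
-- ===== SOURCE A (Python) =====
-- from typing import Dict, List, Iterable, Tuple, Optional, Set
--
-- def _advance_position(fragment: str, line: int, col: int) -> Tuple[int, int]:
--     i = 0
--     L = len(fragment)
--     while i < L:
--         c = fragment[i]
--         if c == "\r":
--             if i + 1 < L and fragment[i + 1] == "\n":
--                 i += 2
--             else:
--                 i += 1
--             line += 1
--             col = 1
--         elif c == "\n":
--             line += 1
--             col = 1
--             i += 1
--         else:
--             col += 1
--             i += 1
--     return line, col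
-- ===== SOURCE B (Python) =====
-- def _advance_position(fragment, line, col):
--     # Normalise the three line-break forms to "\n" (CRLF first), then split:
--     # the number of breaks and the tail length fall out arithmetically.
--     parts = fragment.replace("\r\n", "\n").replace("\r", "\n").split("\n")
--     breaks = len(parts) - 1
--     if breaks == 0:
--         return line, col + len(fragment)
--     return line + breaks, 1 + len(parts[-1])
-- ===== Notes on version B (the rewrite author's own statement) =====
-- stated objective: idiomatic
-- what changed: Replaces the stateful char-by-char index loop (with CRLF lookahead) by normalise-then-split string operations plus closed-form arithmetic on the number of parts and the last part's length.
import Mathlib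
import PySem

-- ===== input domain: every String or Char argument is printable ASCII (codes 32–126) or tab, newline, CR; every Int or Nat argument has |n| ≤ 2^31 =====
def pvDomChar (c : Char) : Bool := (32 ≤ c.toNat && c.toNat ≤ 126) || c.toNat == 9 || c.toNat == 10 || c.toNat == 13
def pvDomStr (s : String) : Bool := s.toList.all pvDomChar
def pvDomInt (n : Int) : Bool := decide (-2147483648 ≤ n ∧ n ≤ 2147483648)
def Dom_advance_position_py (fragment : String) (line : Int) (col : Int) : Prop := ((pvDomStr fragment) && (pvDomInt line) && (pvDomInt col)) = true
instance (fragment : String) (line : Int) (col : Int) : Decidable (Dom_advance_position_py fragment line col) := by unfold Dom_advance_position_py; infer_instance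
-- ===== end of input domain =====

-- B replaces A's stateful char-by-char index loop by normalise-then-split plus arithmetic (idiomatic).


-- ===== PORT A =====
-- A's while-loop over the index i, as the obvious structural recursion over the
-- remaining characters; branches in A's order ('\r' with '\n'-lookahead, '\r', '\n', other).
def advRecA : List Char → Int → Int → Int × Int
  | [], line, col => (line, col)
  | '\r' :: '\n' :: rest, line, col => advRecA rest (line + 1) 1
  | '\r' :: rest, line, col => advRecA rest (line + 1) 1
  | '\n' :: rest, line, col => advRecA rest (line + 1) 1
  | _ :: rest, line, col => advRecA rest line (col + 1)

def advance_position_py (fragment : String) (line : Int) (col : Int) : Int × Int :=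
  advRecA fragment.toList line col

-- ===== PORT B =====
-- Exact hand port of str.replace("\r\n", "\n") for this fixed two-char pattern
-- (leftmost, non-overlapping — exactly Python's replace for this literal pattern).
def replCRLF : List Char → List Char
  | [] => []
  | '\r' :: '\n' :: rest => '\n' :: replCRLF rest
  | c :: rest => c :: replCRLF rest

-- Exact hand port of str.replace("\r", "\n"): a one-char pattern is a per-char map.
def replCR (cs : List Char) : List Char := cs.map (fun c => if c = '\r' then '\n' else c)

-- Exact hand port of str.split("\n") for this one-char separator.
def splitNL : List Char → List (List Char)
  | [] => [[]]
  | c :: rest =>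
    if c = '\n' then [] :: splitNL rest
    else match splitNL rest with
      | p :: ps => (c :: p) :: ps
      | [] => [[c]]

def advance_position_py_alt (fragment : String) (line : Int) (col : Int) : Int × Int :=
  let parts := splitNL (replCR (replCRLF fragment.toList))
  let breaks : Int := (parts.length : Int) - 1
  if breaks = 0 then (line, col + (fragment.toList.length : Int))
  -- parts is provably never empty, so parts[-1] is ported as getLastD
  else (line + breaks, 1 + ((parts.getLastD []).length : Int))

-- ===== PRECONDITION & SPEC =====
def Spec_advance_position_py (fragment : String) (line : Int) (col : Int) (out : Int × Int) : Prop := out = advance_position_py_alt fragment line col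
instance (fragment : String) (line : Int) (col : Int) (out : Int × Int) : Decidable (Spec_advance_position_py fragment line col out) := by unfold Spec_advance_position_py; infer_instance

-- ===== CLAIM (what is proved, stated in full; the proofs are below) =====
def Claim_equal_advance_position_py : Prop := ∀ (fragment : String) (line : Int) (col : Int), Dom_advance_position_py fragment line col → Spec_advance_position_py fragment line col (advance_position_py fragment line col)

-- ===== LEMMAS AND PROOFS =====

-- the parts B computes, as a function of the character list
def partsOf (cs : List Char) : List (List Char) := splitNL (replCR (replCRLF cs))

-- B's result, as a function of the character list
def rhsOf (cs : List Char) (l c : Int) : Int × Int :=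
  let parts := partsOf cs
  let breaks : Int := (parts.length : Int) - 1
  if breaks = 0 then (l, c + (cs.length : Int))
  else (l + breaks, 1 + ((parts.getLastD []).length : Int))

lemma splitNL_ne_nil (cs : List Char) : splitNL cs ≠ [] := by
  cases cs with
  | nil => simp [splitNL]
  | cons c rest =>
    simp only [splitNL]
    split
    · simp
    · split <;> simp

lemma partsOf_ne_nil (cs : List Char) : partsOf cs ≠ [] := splitNL_ne_nil _

lemma partsOf_nil : partsOf [] = [[]] := rfl

lemma partsOf_crlf (r : List Char) : partsOf ('\r' :: '\n' :: r) = [] :: partsOf r := by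
  simp [partsOf, replCRLF, replCR, splitNL]

lemma partsOf_nl (r : List Char) : partsOf ('\n' :: r) = [] :: partsOf r := by
  cases r with
  | nil => rfl
  | cons d r2 => simp [partsOf, replCRLF, replCR, splitNL]

lemma partsOf_cr (r : List Char) (h : ∀ r2, r ≠ '\n' :: r2) :
    partsOf ('\r' :: r) = [] :: partsOf r := by
  cases r with
  | nil => rfl
  | cons d r2 =>
    have hd : d ≠ '\n' := by intro hd; exact h r2 (by rw [hd])
    simp [partsOf, replCRLF, replCR, splitNL, hd]

lemma partsOf_ord (c : Char) (r : List Char) (h1 : c ≠ '\r') (h2 : c ≠ '\n') :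
    partsOf (c :: r) = match partsOf r with
      | p :: ps => (c :: p) :: ps
      | [] => [[c]] := by
  cases r with
  | nil => simp [partsOf, replCRLF, replCR, splitNL, h1, h2]
  | cons d r2 =>
    by_cases hdr : d = '\r'
    · by_cases hr2 : ∃ r3, r2 = '\n' :: r3
      · obtain ⟨r3, rfl⟩ := hr2
        simp [partsOf, replCRLF, replCR, splitNL, h1, h2, hdr]
      · cases r2 with
        | nil => simp [partsOf, replCRLF, replCR, splitNL, h1, h2, hdr]
        | cons e r3 =>
          have he : e ≠ '\n' := fun he => hr2 ⟨r3, by rw [he]⟩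
          simp [partsOf, replCRLF, replCR, splitNL, h1, h2, hdr, he]
    · simp [partsOf, replCRLF, replCR, splitNL, h1, h2, hdr]

lemma partsOf_single : ∀ (cs p : List Char), partsOf cs = [p] → p = cs := by
  intro cs
  induction cs with
  | nil => intro p h; rw [partsOf_nil] at h; simp only [List.cons.injEq] at h; exact h.1.symm
  | cons c r ih =>
    intro p h
    by_cases h0 : c = '\r'
    · subst h0
      rcases r with _ | ⟨c1, r2⟩
      · have hone : partsOf ['\r'] = [[], []] := rfl
        rw [hone] at h
        simp at h
      · by_cases hd : c1 = '\n'
        · subst hd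
          rw [partsOf_crlf] at h
          simp only [List.cons.injEq] at h
          exact absurd h.2 (partsOf_ne_nil r2)
        · rw [partsOf_cr _ (fun r3 hr3 => hd (by injection hr3))] at h
          simp only [List.cons.injEq] at h
          exact absurd h.2 (partsOf_ne_nil _)
    · by_cases h1 : c = '\n'
      · subst h1
        rw [partsOf_nl] at h
        simp only [List.cons.injEq] at h
        exact absurd h.2 (partsOf_ne_nil r)
      · rw [partsOf_ord c r h0 h1] at h
        rcases hr : partsOf r with _ | ⟨q, qs⟩
        · exact absurd hr (partsOf_ne_nil r)
        · rw [hr] at h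
          simp only [List.cons.injEq] at h
          obtain ⟨hq, hqs⟩ := h
          subst hqs
          rw [← hq, ih q hr]

lemma getLastD_of_ne_nil (P : List (List Char)) (hP : P ≠ []) (d e : List Char) :
    P.getLastD d = P.getLastD e := by
  rw [List.getLastD_eq_getLast?, List.getLastD_eq_getLast?,
      List.getLast?_eq_some_getLast hP]
  rfl

lemma rhs_break (cs rs : List Char) (hp : partsOf cs = [] :: partsOf rs) (l c : Int) :
    rhsOf cs l c = rhsOf rs (l + 1) 1 := by
  rcases hQ : partsOf rs with _ | ⟨q, qs⟩
  · exact absurd hQ (partsOf_ne_nil rs)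
  · simp only [rhsOf, hp, hQ, List.length_cons, List.getLastD_cons]
    rcases qs with _ | ⟨q2, qs2⟩
    · have hq : q = rs := partsOf_single rs q hQ
      subst hq
      norm_num
    · split_ifs with h1 h2 h2 <;>
        first
          | (exfalso; simp only [List.length_cons] at h1 h2; push_cast at h1 h2; omega)
          | (refine Prod.ext ?_ ?_ <;> simp only [List.length_cons] <;> push_cast <;> ring)

lemma rhs_ord (c0 : Char) (rs : List Char) (h1 : c0 ≠ '\r') (h2 : c0 ≠ '\n') (l c : Int) :
    rhsOf (c0 :: rs) l c = rhsOf rs l (c + 1) := by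
  have hp := partsOf_ord c0 rs h1 h2
  rcases hQ : partsOf rs with _ | ⟨q, qs⟩
  · exact absurd hQ (partsOf_ne_nil rs)
  · rw [hQ] at hp
    simp only [rhsOf, hp, hQ, List.length_cons, List.getLastD_cons]
    rcases qs with _ | ⟨q2, qs2⟩
    · split_ifs with hA hB hB <;>
        first
          | (exfalso; simp only [List.length_cons, List.length_nil] at *; omega)
          | (refine Prod.ext rfl ?_; simp only [List.length_cons]; push_cast; ring)
    · rw [getLastD_of_ne_nil (q2 :: qs2) (by simp) (c0 :: q) q]
      split_ifs with hA hB hB <;>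
        first
          | (exfalso; simp only [List.length_cons, List.length_nil] at *; omega)
          | (refine Prod.ext ?_ ?_ <;> simp only [List.length_cons] <;> push_cast <;> ring)

-- core equivalence on character lists, by strong induction on the length
lemma advRecA_eq_rhs : ∀ (n : Nat) (cs : List Char), cs.length ≤ n → ∀ (l c : Int),
    advRecA cs l c = rhsOf cs l c := by
  intro n
  induction n with
  | zero =>
    intro cs hlen l c
    have : cs = [] := List.length_eq_zero_iff.mp (Nat.le_zero.mp hlen)
    subst this
    simp [advRecA, rhsOf, partsOf_nil]
  | succ n ih =>
    intro cs hlen l c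
    rcases cs with _ | ⟨c0, r⟩
    · simp [advRecA, rhsOf, partsOf_nil]
    · by_cases h0 : c0 = '\r'
      · subst h0
        rcases r with _ | ⟨c1, r2⟩
        · -- lone '\r' at the end
          have : advRecA ['\r'] l c = (l + 1, 1) := rfl
          rw [this, rhs_break ['\r'] [] (by rfl) l c]
          simp [rhsOf, partsOf_nil]
        · by_cases h1 : c1 = '\n'
          · subst h1
            have hstep : advRecA ('\r' :: '\n' :: r2) l c = advRecA r2 (l + 1) 1 := rfl
            rw [hstep, ih r2 (by simpa using Nat.le_of_succ_le_succ (Nat.le_of_succ_le hlen)) (l + 1) 1,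
                rhs_break _ r2 (partsOf_crlf r2) l c]
          · have hstep : advRecA ('\r' :: c1 :: r2) l c = advRecA (c1 :: r2) (l + 1) 1 := by
              simp [advRecA, h1]
            rw [hstep, ih (c1 :: r2) (by simpa using Nat.le_of_succ_le_succ hlen) (l + 1) 1,
                rhs_break _ (c1 :: r2) (partsOf_cr _ (fun r3 hr3 => h1 (by injection hr3))) l c]
      · by_cases h1 : c0 = '\n'
        · subst h1
          have hstep : advRecA ('\n' :: r) l c = advRecA r (l + 1) 1 := rfl
          rw [hstep, ih r (by simpa using Nat.le_of_succ_le_succ hlen) (l + 1) 1,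
              rhs_break _ r (partsOf_nl r) l c]
        · have hstep : advRecA (c0 :: r) l c = advRecA r l (c + 1) := by
            simp [advRecA, h0, h1]
          rw [hstep, ih r (by simpa using Nat.le_of_succ_le_succ hlen) l (c + 1),
              rhs_ord c0 r h0 h1 l c]

-- ===== VERDICT (by name: the statement is the Claim_ definition above) =====
theorem advance_position_py_spec : Claim_equal_advance_position_py := by
  intro fragment line col _
  unfold Spec_advance_position_py advance_position_py advance_position_py_alt
  simpa [rhsOf, partsOf] using advRecA_eq_rhs fragment.toList.length fragment.toList le_rfl line col
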